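-- pv_equiv track=rewrite | github.com/kanida-ai/KANIDA.AI-TERMINAL | engine/outcome_first/learner.py | _candidate_patterns
-- ===== SOURCE A (Python) =====
-- from itertools import combinations
--
-- def _candidate_patterns(atoms: list[str], max_size: int) -> list[tuple[str, ...]]:
--     priority_prefixes = (
--         "trend_20:",
--         "flow:",
--         "volatility:",
--         "ma_position:",
--         "breakout_state:",
--         "volume:",
--         "candle:",
--         "sr_state:",
--         "range_state:",
--         "ma_slope:",
--         "gap_state:",
--     )
--     atoms = [a for a in atoms if a.startswith(priority_prefixes)]
--     patterns = [(a,) for a in atoms]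
--     for size in range(2, min(max_size, len(atoms)) + 1):
--         for combo in combinations(atoms, size):
--             families = {c.split(":", 1)[0] for c in combo}
--             if len(families) != len(combo):
--                 continue
--             if "trend_20" not in families and "flow" not in families:
--                 continue
--             patterns.append(combo)
--     return patterns
-- ===== SOURCE B (Python) =====
-- def _extend(kept, fams, start, remaining, used, has_tf):
--     # DFS: combos of `remaining` atoms from kept[start:], distinct families (none in `used`),
--     # emitted in the same order as index-lexicographic enumeration
--     if remaining == 0:
--         return [()] if has_tf else []
--     out = []
--     for i in range(start, len(kept) - remaining + 1):
--         f = fams[i]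
--         if f in used:
--             continue
--         used.add(f)
--         for tail in _extend(kept, fams, i + 1, remaining - 1, used,
--                             has_tf or f == "trend_20" or f == "flow"):
--             out.append((kept[i],) + tail)
--         used.discard(f)
--     return out
--
--
-- def _candidate_patterns(atoms: list[str], max_size: int) -> list[tuple[str, ...]]:
--     priority_prefixes = (
--         "trend_20:",
--         "flow:",
--         "volatility:",
--         "ma_position:",
--         "breakout_state:",
--         "volume:",
--         "candle:",
--         "sr_state:",
--         "range_state:",
--         "ma_slope:",
--         "gap_state:",
--     )
--     kept = [a for a in atoms if a.startswith(priority_prefixes)]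
--     fams = [a.split(":", 1)[0] for a in kept]
--     patterns = [(a,) for a in kept]
--     for size in range(2, min(max_size, len(kept)) + 1):
--         patterns.extend(_extend(kept, fams, 0, size, set(), False))
--     return patterns
-- ===== Notes on version B (the rewrite author's own statement) =====
-- stated objective: alternative
-- what changed: Replaces itertools.combinations over all C(n,k) subsets followed by a per-combo family-set check with a DFS over indices in the same lexicographic order that threads the used-family set and the trend_20/flow flag, pruning a branch as soon as a family repeats.
import Mathlib
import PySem

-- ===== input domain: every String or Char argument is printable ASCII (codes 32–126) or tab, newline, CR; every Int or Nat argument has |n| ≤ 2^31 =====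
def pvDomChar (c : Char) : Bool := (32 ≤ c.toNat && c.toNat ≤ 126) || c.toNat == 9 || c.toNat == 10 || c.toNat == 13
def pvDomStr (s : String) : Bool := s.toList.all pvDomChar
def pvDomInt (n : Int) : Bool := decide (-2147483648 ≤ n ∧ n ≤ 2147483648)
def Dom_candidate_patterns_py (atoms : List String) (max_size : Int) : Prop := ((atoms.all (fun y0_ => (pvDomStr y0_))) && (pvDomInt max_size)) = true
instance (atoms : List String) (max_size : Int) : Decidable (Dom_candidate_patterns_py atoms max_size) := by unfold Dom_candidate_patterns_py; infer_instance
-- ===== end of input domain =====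

-- B replaces generate-all-combinations-then-filter with a pruned DFS in the same lexicographic
-- order, threading the used-family set (objective: alternative algorithm; no side effects involved).

-- ===== PORT A =====
-- the tuple `priority_prefixes` (shared by both ports, like the Python sources)
def pvPrefixes : List String :=
  ["trend_20:", "flow:", "volatility:", "ma_position:", "breakout_state:", "volume:",
   "candle:", "sr_state:", "range_state:", "ma_slope:", "gap_state:"]

-- c.split(":", 1)[0]  (the index 0 always exists: split returns a nonempty list)
def pvFam (c : String) : String :=
  PySem.List.pyGetD ((PySem.Str.splitMax? c ":" 1).getD []) 0 ""

-- itertools.combinations(xs, k), in Python's emission order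
def pvCombos {α : Type} : Nat → List α → List (List α)
  | 0, _ => [[]]
  | _ + 1, [] => []
  | k + 1, x :: xs => ((pvCombos k xs).map (fun c => x :: c)) ++ pvCombos (k + 1) xs

def candidate_patterns_py (atoms : List String) (max_size : Int) : List (List String) :=
  let kept := atoms.filter (fun a => pvPrefixes.any (fun p => PySem.Str.startswith a p))
  let patterns := kept.map (fun a => [a])
  (PySem.List.pyRange 2 (min max_size (kept.length : Int) + 1) 1).foldl
    (fun pats size =>
      (pvCombos size.toNat kept).foldl
        (fun pats combo =>
          let families : PySem.Set String := PySem.Set.ofList (combo.map pvFam)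
          if families.length ≠ combo.length then pats
          else if ¬ PySem.Set.contains families "trend_20" ∧ ¬ PySem.Set.contains families "flow" then pats
          else pats ++ [combo])
        pats)
    patterns

-- ===== PORT B =====
-- DFS of Source B's `_extend`: the Python loop `for i in range(start, len(kept)-remaining+1)` over
-- candidate positions is the recursion over the suffix of (atom, family) pairs; positions the
-- Python range bound prunes away contribute [] here (the `[], _+1` case), so the output is identical.
def pvExtend : List (String × String) → Nat → PySem.Set String → Bool → List (List String)
  | _, 0, _, hasTF => if hasTF then [[]] else []
  | [], _ + 1, _, _ => []
  | (a, f) :: rest, r + 1, used, hasTF =>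
      (if PySem.Set.contains used f then []
       else (pvExtend rest r (PySem.Set.add used f)
               (hasTF || f == "trend_20" || f == "flow")).map (fun t => a :: t))
      ++ pvExtend rest (r + 1) used hasTF

def candidate_patterns_py_alt (atoms : List String) (max_size : Int) : List (List String) :=
  let kept := atoms.filter (fun a => pvPrefixes.any (fun p => PySem.Str.startswith a p))
  let pairs := kept.map (fun a => (a, pvFam a))
  (PySem.List.pyRange 2 (min max_size (kept.length : Int) + 1) 1).foldl
    (fun pats size => pats ++ pvExtend pairs size.toNat PySem.Set.empty false)
    (kept.map (fun a => [a]))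

-- ===== PRECONDITION & SPEC =====
def Spec_candidate_patterns_py (atoms : List String) (max_size : Int) (out : List (List String)) : Prop := out = candidate_patterns_py_alt atoms max_size
instance (atoms : List String) (max_size : Int) (out : List (List String)) : Decidable (Spec_candidate_patterns_py atoms max_size out) := by unfold Spec_candidate_patterns_py; infer_instance

-- ===== CLAIM (what is proved, stated in full; the proofs are below) =====
def Claim_equal_candidate_patterns_py : Prop := ∀ (atoms : List String) (max_size : Int), Dom_candidate_patterns_py atoms max_size → Spec_candidate_patterns_py atoms max_size (candidate_patterns_py atoms max_size)

-- ===== LEMMAS AND PROOFS =====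

-- validity of a combo of (atom, family) pairs relative to the DFS state (used, hasTF),
-- phrased as the DFS threads it
def pvOk : PySem.Set String → Bool → List (String × String) → Bool
  | _, hasTF, [] => hasTF
  | used, hasTF, (_, f) :: c =>
      !(PySem.Set.contains used f)
        && pvOk (PySem.Set.add used f) (hasTF || f == "trend_20" || f == "flow") c

theorem pvCombos_map {α β : Type} (h : α → β) :
    ∀ (k : Nat) (xs : List α), pvCombos k (xs.map h) = (pvCombos k xs).map (List.map h) := by
  intro k xs
  induction xs generalizing k with
  | nil => cases k <;> simp [pvCombos]
  | cons x xs ih =>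
      cases k with
      | zero => simp [pvCombos]
      | succ k => simp [pvCombos, ih, List.map_map, Function.comp_def]

-- pvOk characterised: distinct families, all outside `used`, and trend_20/flow present (or hasTF)
theorem pvOk_iff (c : List (String × String)) :
    ∀ (used : PySem.Set String) (hasTF : Bool),
      pvOk used hasTF c = true ↔
        ((c.map Prod.snd).Nodup ∧ (∀ g ∈ c.map Prod.snd, g ∉ used) ∧
          (hasTF = true ∨ ∃ g ∈ c.map Prod.snd, g = "trend_20" ∨ g = "flow")) := by
  induction c with
  | nil => intro used hasTF; simp [pvOk]
  | cons p c ih =>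
      rintro used hasTF
      obtain ⟨a, f⟩ := p
      rw [pvOk, Bool.and_eq_true, ih]
      have hcf : (!PySem.Set.contains used f) = true ↔ f ∉ used := by
        rw [Bool.not_eq_true', ← PySem.Set.contains_iff used f]
        simp
      simp only [hcf, PySem.Set.mem_add, List.map_cons, List.nodup_cons, List.mem_cons,
        Bool.or_eq_true, beq_iff_eq]
      constructor
      · rintro ⟨hfu, hnd, hall, hor⟩
        refine ⟨⟨fun hf => hall f hf (Or.inr rfl), hnd⟩,
          fun g hg => ?_, ?_⟩
        · rcases hg with rfl | hg
          · exact hfu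
          · exact fun hu => hall g hg (Or.inl hu)
        · rcases hor with ((h | h) | h) | ⟨g, hg, h⟩
          · exact Or.inl h
          · exact Or.inr ⟨f, Or.inl rfl, Or.inl h⟩
          · exact Or.inr ⟨f, Or.inl rfl, Or.inr h⟩
          · exact Or.inr ⟨g, Or.inr hg, h⟩
      · rintro ⟨⟨hnf, hnd⟩, hall, hor⟩
        refine ⟨hall f (Or.inl rfl), hnd, fun g hg => ?_, ?_⟩
        · rintro (hu | rfl)
          · exact hall g (Or.inr hg) hu
          · exact hnf hg
        · rcases hor with h | ⟨g, rfl | hg, h⟩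
          · exact Or.inl (Or.inl (Or.inl h))
          · rcases h with h | h
            · exact Or.inl (Or.inl (Or.inr h))
            · exact Or.inl (Or.inr h)
          · exact Or.inr ⟨g, hg, h⟩

-- the DFS equals combinations filtered by pvOk, with the chosen atoms projected out
theorem pvExtend_eq (pairs : List (String × String)) :
    ∀ (r : Nat) (used : PySem.Set String) (hasTF : Bool),
      pvExtend pairs r used hasTF =
        (pvCombos r pairs).filterMap
          (fun c => if pvOk used hasTF c then some (c.map Prod.fst) else none) := by
  induction pairs with
  | nil =>
      intro r used hasTF
      cases r with
      | zero => cases hasTF <;> simp [pvExtend, pvCombos, pvOk]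
      | succ r => simp [pvExtend, pvCombos]
  | cons p rest ih =>
      rintro r used hasTF
      obtain ⟨a, f⟩ := p
      cases r with
      | zero => cases hasTF <;> simp [pvExtend, pvCombos, pvOk]
      | succ r =>
          rw [pvExtend]
          simp only [pvCombos, List.filterMap_append, List.filterMap_map]
          congr 1
          · by_cases hc : PySem.Set.contains used f = true
            · rw [if_pos hc]
              have hok0 : ∀ c : List (String × String),
                  pvOk used hasTF ((a, f) :: c) = false := by
                intro c; rw [pvOk, hc]; simp
              symm
              apply List.filterMap_eq_nil_iff.mpr
              intro c _
              simp [hok0]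
            · rw [if_neg hc]
              rw [ih r (PySem.Set.add used f) (hasTF || f == "trend_20" || f == "flow"),
                List.map_filterMap]
              apply List.filterMap_congr
              intro c _
              rw [Bool.not_eq_true] at hc
              simp only [Function.comp_def, pvOk, hc, Bool.not_false, Bool.true_and]
              split <;> simp
          · exact ih (r + 1) used hasTF

theorem pvOfList_length_iff (l : List String) :
    (PySem.Set.ofList l).length = l.length ↔ l.Nodup := by
  induction l using List.reverseRecOn with
  | nil => simp [PySem.Set.ofList_nil]
  | append_singleton xs x ih =>
      rw [PySem.Set.ofList_append_singleton, PySem.Set.add_eq_ite]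
      have hle := PySem.Set.length_ofList_le (xs := xs)
      by_cases hx : x ∈ xs
      · have hx' : x ∈ PySem.Set.ofList xs := (PySem.Set.mem_ofList xs x).mpr hx
        simp only [hx', if_true, List.length_append, List.length_singleton]
        constructor
        · intro h; omega
        · intro h
          have hdis := (List.nodup_append.mp h).2.2
          exact absurd rfl (hdis x hx x (List.mem_singleton.mpr rfl))
      · have hx' : x ∉ PySem.Set.ofList xs := fun h => hx ((PySem.Set.mem_ofList xs x).mp h)
        simp only [hx', if_false, List.length_append, List.length_singleton,
          List.nodup_append, List.nodup_singleton]
        constructor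
        · intro h
          refine ⟨ih.mp (by omega), trivial, ?_⟩
          intro y hy b hb
          rw [List.mem_singleton.mp hb]
          intro e
          exact hx (e ▸ hy)
        · rintro ⟨hnd, -, -⟩
          have := ih.mpr hnd
          omega

theorem pvFilterMap_guard {α : Type} (q : α → Bool) (l : List α) :
    l.filterMap (fun c => if q c then some c else none) = l.filter q := by
  induction l with
  | nil => rfl
  | cons x xs ih => by_cases h : q x = true <;> simp [h, ih]

-- B's DFS from the root state produces exactly A's filtered combinations
theorem pvExtend_root (kept : List String) (r : Nat) :
    pvExtend (kept.map (fun a => (a, pvFam a))) r PySem.Set.empty false =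
      (pvCombos r kept).filter
        (fun combo =>
          decide (¬((PySem.Set.ofList (combo.map pvFam)).length ≠ combo.length) ∧
            ¬(¬ PySem.Set.contains (PySem.Set.ofList (combo.map pvFam)) "trend_20" = true ∧
              ¬ PySem.Set.contains (PySem.Set.ofList (combo.map pvFam)) "flow" = true))) := by
  rw [pvExtend_eq, pvCombos_map, List.filterMap_map, ← pvFilterMap_guard]
  apply List.filterMap_congr
  intro c _
  have hmf : (c.map (fun a => (a, pvFam a))).map Prod.fst = c := by
    simp [List.map_map, Function.comp_def]
  have hok : pvOk PySem.Set.empty false (c.map (fun a => (a, pvFam a))) =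
      decide (¬((PySem.Set.ofList (c.map pvFam)).length ≠ c.length) ∧
        ¬(¬ PySem.Set.contains (PySem.Set.ofList (c.map pvFam)) "trend_20" = true ∧
          ¬ PySem.Set.contains (PySem.Set.ofList (c.map pvFam)) "flow" = true)) := by
    rw [Bool.eq_iff_iff, pvOk_iff, decide_eq_true_eq]
    have hsnd : (c.map (fun a => (a, pvFam a))).map Prod.snd = c.map pvFam := by
      simp [List.map_map, Function.comp_def]
    have hlen := pvOfList_length_iff (c.map pvFam)
    simp only [hsnd, List.length_map] at hlen ⊢
    have hct : ∀ t : String,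
        PySem.Set.contains (PySem.Set.ofList (c.map pvFam)) t = true ↔ t ∈ c.map pvFam := by
      intro t
      rw [PySem.Set.contains_iff, PySem.Set.mem_ofList]
    simp only [hct]
    constructor
    · rintro ⟨hnd, -, hor⟩
      refine ⟨fun h => h (hlen.mpr hnd), ?_⟩
      rintro ⟨h1, h2⟩
      rcases hor with h | ⟨g, hg, rfl | rfl⟩
      · exact absurd h (by simp)
      · exact h1 hg
      · exact h2 hg
    · rintro ⟨h1, h2⟩
      refine ⟨hlen.mp (by omega), by simp, ?_⟩
      by_cases ht : "trend_20" ∈ c.map pvFam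
      · exact Or.inr ⟨"trend_20", ht, Or.inl rfl⟩
      · have hf : "flow" ∈ c.map pvFam := by tauto
        exact Or.inr ⟨"flow", hf, Or.inr rfl⟩
  rw [Function.comp_def]
  simp only []
  rw [hok, hmf]

-- ===== VERDICT (by name: the statement is the Claim_ definition above) =====
theorem candidate_patterns_py_spec : Claim_equal_candidate_patterns_py := by
  intro atoms max_size _
  unfold Spec_candidate_patterns_py candidate_patterns_py candidate_patterns_py_alt
  apply PySem.List.foldl_congr_mem
  intro pats size _
  have hbody :
      (pvCombos size.toNat (atoms.filter (fun a => pvPrefixes.any (fun p => PySem.Str.startswith a p)))).foldl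
        (fun pats combo =>
          let families : PySem.Set String := PySem.Set.ofList (combo.map pvFam)
          if families.length ≠ combo.length then pats
          else if ¬ PySem.Set.contains families "trend_20" ∧ ¬ PySem.Set.contains families "flow" then pats
          else pats ++ [combo]) pats
      = (pvCombos size.toNat (atoms.filter (fun a => pvPrefixes.any (fun p => PySem.Str.startswith a p)))).foldl
        (fun pats combo =>
          if (fun combo => decide (¬((PySem.Set.ofList (combo.map pvFam)).length ≠ combo.length) ∧
                ¬(¬ PySem.Set.contains (PySem.Set.ofList (combo.map pvFam)) "trend_20" = true ∧
                  ¬ PySem.Set.contains (PySem.Set.ofList (combo.map pvFam)) "flow" = true))) combo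
          then pats ++ [combo] else pats) pats := by
    apply PySem.List.foldl_congr_mem
    intro acc combo _
    by_cases h1 : (PySem.Set.ofList (combo.map pvFam)).length ≠ combo.length
    · rw [if_pos h1, if_neg]
      simp only [decide_eq_true_eq, not_and, not_not]
      exact fun h => absurd h1 (by simp [h])
    · by_cases h2 : ¬ PySem.Set.contains (PySem.Set.ofList (combo.map pvFam)) "trend_20" = true ∧
          ¬ PySem.Set.contains (PySem.Set.ofList (combo.map pvFam)) "flow" = true
      · rw [if_neg h1, if_pos h2, if_neg]
        simp only [decide_eq_true_eq]
        exact fun h => h.2 h2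
      · rw [if_neg h1, if_neg h2, if_pos]
        simp only [decide_eq_true_eq]
        exact ⟨h1, h2⟩
  rw [hbody, PySem.List.foldl_append_if_eq_filter, pvExtend_root]
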